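-- pv_equiv track=rewrite | github.com/Nostoi/rom24-quickmud-python | mud/loaders/json_loader.py | _rom_flags_to_int
-- ===== SOURCE A (Python) =====
-- def _rom_flags_to_int(flags_str: str) -> int:
--     """Convert ROM-style letter flag strings to their integer bitfield."""
--
--     if not flags_str:
--         return 0
--
--     if isinstance(flags_str, int):
--         return flags_str
--
--     result = 0
--     pending_number = 0
--     building_number = False
--     i = 0
--     length = len(flags_str)
--
--     while i < length:
--         ch = flags_str[i]
--
--         if ch.isspace() or ch == "|":
--             if building_number:
--                 result += pending_number
--                 pending_number = 0
--                 building_number = False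
--             i += 1
--             continue
--
--         if ch.isdigit():
--             pending_number = pending_number * 10 + int(ch)
--             building_number = True
--             i += 1
--             continue
--
--         if building_number:
--             result += pending_number
--             pending_number = 0
--             building_number = False
--
--         if i + 1 < length:
--             token = flags_str[i : i + 2]
--             if token in {"aa", "bb", "cc", "dd"}:
--                 offset = {"aa": 0, "bb": 1, "cc": 2, "dd": 3}[token]
--                 result |= 1 << (26 + offset)
--                 i += 2
--                 continue
--
--         if "A" <= ch <= "Z":
--             result |= 1 << (ord(ch) - ord("A"))
--         elif "a" <= ch <= "z":
--             result |= 1 << (ord(ch) - ord("a") + 26)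
--
--         i += 1
--
--     if building_number:
--         result += pending_number
--
--     return result
-- ===== SOURCE B (Python) =====
-- def _rom_flags_to_int(flags_str: str) -> int:
--     """Convert ROM-style letter flag strings to their integer bitfield."""
--
--     if not flags_str:
--         return 0
--
--     if isinstance(flags_str, int):
--         return flags_str
--
--     # Pass 1: tokenize into maximal digit runs (stored as ints) and single chars.
--     tokens = []
--     run = ''
--     for ch in flags_str:
--         if ch.isdigit():
--             run += ch
--             continue
--         if run:
--             tokens.append(int(run))
--             run = ''
--         tokens.append(ch)
--     if run:
--         tokens.append(int(run))
--
--     # Pass 2: fold over tokens.  The aa/bb/cc/dd digraphs need no special case: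
--     # each letter ORs the same bit, and OR is idempotent.
--     result = 0
--     for t in tokens:
--         if isinstance(t, int):
--             result += t
--         elif 'A' <= t <= 'Z':
--             result |= 1 << (ord(t) - 65)
--         elif 'a' <= t <= 'z':
--             result |= 1 << (ord(t) - 97 + 26)
--     return result
-- ===== Notes on version B (the rewrite author's own statement) =====
-- stated objective: simpler
-- what changed: B replaces A's index-driven state machine (pending-number accumulator, building flag, two-char lookahead with the aa/bb/cc/dd digraph table) by a tokenize-then-fold decomposition: split the string into maximal digit runs and single characters, then fold adding int(run) for digit runs and OR-ing the letter bit per letter; the digraph special case is dropped because OR is idempotent and aa/bb/cc/dd set exactly the bits of a/b/c/d.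
import Mathlib
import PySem

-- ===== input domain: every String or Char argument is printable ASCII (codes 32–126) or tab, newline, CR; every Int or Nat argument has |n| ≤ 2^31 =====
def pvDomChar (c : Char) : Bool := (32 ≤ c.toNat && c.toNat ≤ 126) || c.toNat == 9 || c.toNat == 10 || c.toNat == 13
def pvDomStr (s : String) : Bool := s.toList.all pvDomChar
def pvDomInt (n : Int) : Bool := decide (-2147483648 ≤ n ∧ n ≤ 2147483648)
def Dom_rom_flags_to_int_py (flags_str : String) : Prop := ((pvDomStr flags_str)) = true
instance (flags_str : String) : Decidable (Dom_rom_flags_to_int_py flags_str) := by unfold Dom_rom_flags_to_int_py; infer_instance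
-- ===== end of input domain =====

-- B replaces A's index state machine by a tokenize-then-fold decomposition (simpler; same O(n) cost).

-- ===== PORT A =====
-- A's `if "A" <= ch <= "Z": result |= 1 << (ord(ch)-ord("A")) elif "a" <= ch <= "z": ...` block
def romLetterA (result : Int) (ch : Char) : Int :=
  if 'A' ≤ ch ∧ ch ≤ 'Z' then Int.lor result (Int.shiftLeft 1 (ch.toNat - 65))
  else if 'a' ≤ ch ∧ ch ≤ 'z' then Int.lor result (Int.shiftLeft 1 (ch.toNat - 97 + 26))
  else result

-- A's `while i < length` loop: i only advances, so it is recursion on the remaining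
-- characters with A's exact state (result, pending_number, building_number).
-- `int(ch)` on a decimal digit is its digit value ch.toNat - 48 (exact there).
def romLoopA : List Char → Int → Int → Bool → Int
  | [], result, pending, building =>
      if building then result + pending else result
  | ch :: rest, result, pending, building =>
      if PySem.Chars.isspace ch || ch == '|' then
        romLoopA rest (if building then result + pending else result) 0 false
      else if PySem.Chars.isdigit ch then
        romLoopA rest result (pending * 10 + ((ch.toNat : Int) - 48)) true
      else
        -- flush pending number, then the two-char aa/bb/cc/dd lookahead (token = flags_str[i:i+2])
        let result' := if building then result + pending else result
        match rest with
        | c2 :: rest2 =>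
            if (ch == 'a' && c2 == 'a') || (ch == 'b' && c2 == 'b') ||
               (ch == 'c' && c2 == 'c') || (ch == 'd' && c2 == 'd') then
              -- offset = {"aa":0,"bb":1,"cc":2,"dd":3}[token] = ch.toNat - 97
              romLoopA rest2 (Int.lor result' (Int.shiftLeft 1 (26 + (ch.toNat - 97)))) 0 false
            else
              romLoopA (c2 :: rest2) (romLetterA result' ch) 0 false
        | [] => romLoopA [] (romLetterA result' ch) 0 false

-- `if not flags_str: return 0`; the `isinstance(flags_str, int)` guard is unreachable for a str argument
def rom_flags_to_int_py (flags_str : String) : Int :=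
  if flags_str = "" then 0 else romLoopA flags_str.toList 0 0 false

-- ===== PORT B =====
-- int(run) for a nonempty run of decimal digits (exact there)
def romDigitsVal (run : List Char) : Int :=
  run.foldl (fun a c => a * 10 + ((c.toNat : Int) - 48)) 0

-- B's pass 1: maximal digit runs (already converted by int) and single characters
def romTokenize : List Char → List Char → List (Int ⊕ Char)
  | [], run => if run.isEmpty then [] else [Sum.inl (romDigitsVal run)]
  | ch :: rest, run =>
      if PySem.Chars.isdigit ch then romTokenize rest (run ++ [ch])
      else if run.isEmpty then Sum.inr ch :: romTokenize rest []
      else Sum.inl (romDigitsVal run) :: Sum.inr ch :: romTokenize rest []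

-- B's pass 2: fold over tokens ('A' <= t <= 'Z' on a one-char string is the char comparison)
def romApply : List (Int ⊕ Char) → Int → Int
  | [], result => result
  | Sum.inl n :: ts, result => romApply ts (result + n)
  | Sum.inr ch :: ts, result =>
      romApply ts
        (if 'A' ≤ ch ∧ ch ≤ 'Z' then Int.lor result (Int.shiftLeft 1 (ch.toNat - 65))
         else if 'a' ≤ ch ∧ ch ≤ 'z' then Int.lor result (Int.shiftLeft 1 (ch.toNat - 97 + 26))
         else result)

def rom_flags_to_int_py_alt (flags_str : String) : Int :=
  if flags_str = "" then 0 else romApply (romTokenize flags_str.toList []) 0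

-- ===== PRECONDITION & SPEC =====
def Spec_rom_flags_to_int_py (flags_str : String) (out : Int) : Prop := out = rom_flags_to_int_py_alt flags_str
instance (flags_str : String) (out : Int) : Decidable (Spec_rom_flags_to_int_py flags_str out) := by unfold Spec_rom_flags_to_int_py; infer_instance

-- ===== CLAIM (what is proved, stated in full; the proofs are below) =====
def Claim_equal_rom_flags_to_int_py : Prop := ∀ (flags_str : String), Dom_rom_flags_to_int_py flags_str → Spec_rom_flags_to_int_py flags_str (rom_flags_to_int_py flags_str)

-- ===== LEMMAS AND PROOFS =====
lemma char_le_iff (a c : Char) : a ≤ c ↔ a.toNat ≤ c.toNat := by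
  rw [Char.le_def, UInt32.le_iff_toNat_le]; simp only [Char.toNat_val]

lemma cn0 : '0'.toNat = 48 := rfl
lemma cn9 : '9'.toNat = 57 := rfl
lemma cnA : 'A'.toNat = 65 := rfl
lemma cnZ : 'Z'.toNat = 90 := rfl
lemma cna : 'a'.toNat = 97 := rfl
lemma cnz : 'z'.toNat = 122 := rfl

lemma lor_lor_self (r b : Int) : Int.lor (Int.lor r b) b = Int.lor r b := by
  cases r <;> cases b <;> simp only [Int.lor] <;> congr 1 <;>
    apply Nat.eq_of_testBit_eq <;> intro i <;>
    simp [Nat.testBit_ldiff] <;> tauto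

lemma isspace_facts (c : Char) (h : PySem.Chars.isspace c = true) :
    PySem.Chars.isdigit c = false ∧ ¬('A' ≤ c ∧ c ≤ 'Z') ∧ ¬('a' ≤ c ∧ c ≤ 'z') := by
  simp only [PySem.Chars.isspace, PySem.Chars.isdigit, char_le_iff, decide_eq_true_eq,
    Bool.or_eq_true, not_and, Bool.and_eq_true, cn0, cn9, cnA, cnZ, cna, cnz,
    decide_eq_false_iff_not, not_le, Bool.and_eq_false_iff] at h ⊢
  omega

lemma digitsVal_nil : romDigitsVal [] = 0 := rfl

lemma digitsVal_append (run : List Char) (c : Char) :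
    romDigitsVal (run ++ [c]) = romDigitsVal run * 10 + ((c.toNat : Int) - 48) := by
  simp [romDigitsVal]

lemma flush_eq (run : List Char) (result : Int) :
    (if (!run.isEmpty) = true then result + romDigitsVal run else result)
      = result + romDigitsVal run := by
  cases run <;> simp [digitsVal_nil]

-- a non-space non-'|' non-digit character hits the letter/no-op step in both ports
lemma loopA_space (ch : Char) (rest : List Char) (r p : Int) (b : Bool)
    (hsp : (PySem.Chars.isspace ch || ch == '|') = true) :
    romLoopA (ch :: rest) r p b = romLoopA rest (if b then r + p else r) 0 false := by
  rw [romLoopA]; simp only [hsp, if_true]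

lemma loopA_digit (ch : Char) (rest : List Char) (r p : Int) (b : Bool)
    (hsp : (PySem.Chars.isspace ch || ch == '|') = false)
    (hd : PySem.Chars.isdigit ch = true) :
    romLoopA (ch :: rest) r p b = romLoopA rest r (p * 10 + ((ch.toNat : Int) - 48)) true := by
  rw [romLoopA]; simp only [hsp, hd, Bool.false_eq_true, if_false, if_true]

lemma loopA_pair (ch c2 : Char) (rest2 : List Char) (r p : Int) (b : Bool)
    (hsp : (PySem.Chars.isspace ch || ch == '|') = false)
    (hd : PySem.Chars.isdigit ch = false)
    (hpair : ((ch == 'a' && c2 == 'a') || (ch == 'b' && c2 == 'b') ||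
              (ch == 'c' && c2 == 'c') || (ch == 'd' && c2 == 'd')) = true) :
    romLoopA (ch :: c2 :: rest2) r p b
      = romLoopA rest2 (Int.lor (if b then r + p else r) (Int.shiftLeft 1 (26 + (ch.toNat - 97)))) 0 false := by
  rw [romLoopA]; simp only [hsp, hd, Bool.false_eq_true, if_false, hpair, if_true]

lemma loopA_char_cons (ch c2 : Char) (rest2 : List Char) (r p : Int) (b : Bool)
    (hsp : (PySem.Chars.isspace ch || ch == '|') = false)
    (hd : PySem.Chars.isdigit ch = false)
    (hpair : ((ch == 'a' && c2 == 'a') || (ch == 'b' && c2 == 'b') ||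
              (ch == 'c' && c2 == 'c') || (ch == 'd' && c2 == 'd')) = false) :
    romLoopA (ch :: c2 :: rest2) r p b
      = romLoopA (c2 :: rest2) (romLetterA (if b then r + p else r) ch) 0 false := by
  rw [romLoopA]; simp only [hsp, hd, Bool.false_eq_true, if_false, hpair]

lemma loopA_char_nil (ch : Char) (r p : Int) (b : Bool)
    (hsp : (PySem.Chars.isspace ch || ch == '|') = false)
    (hd : PySem.Chars.isdigit ch = false) :
    romLoopA [ch] r p b = romLetterA (if b then r + p else r) ch := by
  rw [romLoopA]; simp only [hsp, hd, Bool.false_eq_true, if_false]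
  rw [romLoopA]; simp

lemma tok_digit (ch : Char) (rest run : List Char) (hd : PySem.Chars.isdigit ch = true) :
    romTokenize (ch :: rest) run = romTokenize rest (run ++ [ch]) := by
  rw [romTokenize]; simp only [hd, if_true]

lemma tok_char (ch : Char) (rest run : List Char) (hd : PySem.Chars.isdigit ch = false) :
    romTokenize (ch :: rest) run
      = if run.isEmpty then Sum.inr ch :: romTokenize rest []
        else Sum.inl (romDigitsVal run) :: Sum.inr ch :: romTokenize rest [] := by
  rw [romTokenize]; simp only [hd, Bool.false_eq_true, if_false]

-- the B-side fold over (maybe-flush ++ one char token ++ ts) in one step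
lemma apply_flush_char (ch : Char) (ts : List (Int ⊕ Char)) (run : List Char) (result : Int) :
    romApply (if run.isEmpty then Sum.inr ch :: ts
              else Sum.inl (romDigitsVal run) :: Sum.inr ch :: ts) result
      = romApply ts (romLetterA (result + romDigitsVal run) ch) := by
  cases hre : run.isEmpty
  · simp only [Bool.false_eq_true, if_false]
    rw [romApply, romApply, romLetterA]
  · have : run = [] := by cases run <;> simp_all
    subst this
    simp only [if_true, digitsVal_nil, add_zero]
    rw [romApply, romLetterA]

lemma apply_inr (ch : Char) (ts : List (Int ⊕ Char)) (r : Int) :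
    romApply (Sum.inr ch :: ts) r = romApply ts (romLetterA r ch) := by
  rw [romApply, romLetterA]

lemma letter_lower (r : Int) (c : Char) (h1 : ¬('A' ≤ c ∧ c ≤ 'Z')) (h2 : 'a' ≤ c ∧ c ≤ 'z') :
    romLetterA r c = Int.lor r (Int.shiftLeft 1 (c.toNat - 97 + 26)) := by
  rw [romLetterA, if_neg h1, if_pos h2]

lemma romKey_nil (run : List Char) (result : Int) :
    romLoopA [] result (romDigitsVal run) (!run.isEmpty) = romApply (romTokenize [] run) result := by
  cases run <;> simp [romLoopA, romTokenize, romApply]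

lemma romKey : ∀ (n : Nat) (cs : List Char), cs.length ≤ n → ∀ (run : List Char) (result : Int),
    romLoopA cs result (romDigitsVal run) (!run.isEmpty) = romApply (romTokenize cs run) result := by
  intro n
  induction n with
  | zero =>
    intro cs h run result
    have hcs : cs = [] := List.eq_nil_of_length_eq_zero (Nat.le_zero.mp h)
    subst hcs; exact romKey_nil run result
  | succ n ih =>
    intro cs h run result
    match cs with
    | [] => exact romKey_nil run result
    | ch :: rest =>
      by_cases hsp : (PySem.Chars.isspace ch || ch == '|') = true
      · -- whitespace or '|': both sides flush and skip
        have hfacts : PySem.Chars.isdigit ch = false ∧ ¬('A' ≤ ch ∧ ch ≤ 'Z') ∧ ¬('a' ≤ ch ∧ ch ≤ 'z') := by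
          have hsp' := hsp
          simp only [Bool.or_eq_true, beq_iff_eq] at hsp'
          rcases hsp' with hs | hb
          · exact isspace_facts ch hs
          · subst hb; refine ⟨by decide, by decide, by decide⟩
        obtain ⟨hd, hU, hL⟩ := hfacts
        have hlen : rest.length ≤ n := by simpa using Nat.le_of_succ_le_succ h
        rw [loopA_space ch rest result (romDigitsVal run) _ hsp, flush_eq,
          show (0 : Int) = romDigitsVal [] from rfl,
          show false = !(([] : List Char).isEmpty) from rfl,
          ih rest hlen [] (result + romDigitsVal run),
          tok_char ch rest run hd, apply_flush_char, romLetterA]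
        simp only [hU, hL, if_false]
      · by_cases hdig : PySem.Chars.isdigit ch = true
        · -- digit: extend the pending run
          have hlen : rest.length ≤ n := by simpa using Nat.le_of_succ_le_succ h
          have hsp' : (PySem.Chars.isspace ch || ch == '|') = false := by
            simpa using hsp
          rw [loopA_digit ch rest result (romDigitsVal run) _ hsp' hdig,
            show romDigitsVal run * 10 + ((ch.toNat : Int) - 48) = romDigitsVal (run ++ [ch]) from (digitsVal_append run ch).symm,
            show true = !((run ++ [ch]).isEmpty) by simp,
            ih rest hlen (run ++ [ch]) result, tok_digit ch rest run hdig]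
        · -- other character: flush, then letter bit / digraph / no-op
          have hsp' : (PySem.Chars.isspace ch || ch == '|') = false := by
            simpa using hsp
          have hd : PySem.Chars.isdigit ch = false := by
            cases hx : PySem.Chars.isdigit ch
            · rfl
            · exact absurd hx hdig
          match rest with
          | [] =>
            rw [loopA_char_nil ch result (romDigitsVal run) _ hsp' hd, flush_eq,
              tok_char ch [] run hd, apply_flush_char]
            rw [show romTokenize [] [] = [] from rfl, romApply]
          | c2 :: rest2 =>
            have hlen2 : rest2.length ≤ n := by
              have := h; simp at this; omega
            have hlen1 : (c2 :: rest2).length ≤ n := by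
              have := h; simp at this; simp; omega
            by_cases hpair : ((ch == 'a' && c2 == 'a') || (ch == 'b' && c2 == 'b') ||
                (ch == 'c' && c2 == 'c') || (ch == 'd' && c2 == 'd')) = true
            · -- aa/bb/cc/dd digraph: B ORs the same bit twice, OR is idempotent
              have hcc : (ch = 'a' ∧ c2 = 'a') ∨ (ch = 'b' ∧ c2 = 'b') ∨
                  (ch = 'c' ∧ c2 = 'c') ∨ (ch = 'd' ∧ c2 = 'd') := by
                have := hpair; simp only [Bool.or_eq_true, Bool.and_eq_true, beq_iff_eq] at this
                tauto
              rw [loopA_pair ch c2 rest2 result (romDigitsVal run) _ hsp' hd hpair, flush_eq,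
                tok_char ch (c2 :: rest2) run hd, apply_flush_char]
              rcases hcc with ⟨h1, h2⟩ | ⟨h1, h2⟩ | ⟨h1, h2⟩ | ⟨h1, h2⟩ <;> subst h1 <;> subst h2 <;>
                rw [tok_char _ rest2 [] (by decide),
                  if_pos (show ([] : List Char).isEmpty = true from rfl),
                  apply_inr,
                  letter_lower _ _ (by decide) (by decide),
                  letter_lower _ _ (by decide) (by decide),
                  lor_lor_self,
                  show (0 : Int) = romDigitsVal [] from rfl,
                  show false = !(([] : List Char).isEmpty) from rfl,
                  ih rest2 hlen2 [] _] <;>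
                congr 2
            · have hpair' : ((ch == 'a' && c2 == 'a') || (ch == 'b' && c2 == 'b') ||
                  (ch == 'c' && c2 == 'c') || (ch == 'd' && c2 == 'd')) = false := by
                cases hx : ((ch == 'a' && c2 == 'a') || (ch == 'b' && c2 == 'b') ||
                    (ch == 'c' && c2 == 'c') || (ch == 'd' && c2 == 'd'))
                · rfl
                · exact absurd hx hpair
              rw [loopA_char_cons ch c2 rest2 result (romDigitsVal run) _ hsp' hd hpair', flush_eq,
                tok_char ch (c2 :: rest2) run hd, apply_flush_char,
                show (0 : Int) = romDigitsVal [] from rfl,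
                show false = !(([] : List Char).isEmpty) from rfl,
                ih (c2 :: rest2) hlen1 [] _]

-- ===== VERDICT (by name: the statement is the Claim_ definition above) =====
theorem rom_flags_to_int_py_spec : Claim_equal_rom_flags_to_int_py := by
  intro s _
  unfold Spec_rom_flags_to_int_py rom_flags_to_int_py rom_flags_to_int_py_alt
  by_cases h : s = ""
  · simp [h]
  · simp only [h, if_false]
    exact (romKey s.toList.length s.toList le_rfl [] 0).symm ▸ rfl
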